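-- pv_equiv track=rewrite | github.com/sw8744/AP-Programming | lecture_20.py | three_doubles
-- ===== SOURCE A (Python) =====
-- def three_doubles(word):
--     s = ""
--     for i in range(1, len(word)):
--         if word[i-1] == word[i]:
--             s = s + "*"
--         else:
--             s = s + " "
--     return "* * *" in s
-- ===== SOURCE B (Python) =====
-- def three_doubles(word):
--     for p in range(len(word) - 5):
--         if (word[p] == word[p + 1] and word[p + 1] != word[p + 2]
--                 and word[p + 2] == word[p + 3] and word[p + 3] != word[p + 4]
--                 and word[p + 4] == word[p + 5]):
--             return True
--     return False
-- ===== Notes on version B (the rewrite author's own statement) =====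
-- stated objective: simpler
-- what changed: B scans 6-character windows directly for the double/gap/double/gap/double pattern instead of building an intermediate '*'/' ' marker string and substring-searching it for '* * *'.
import Mathlib
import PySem

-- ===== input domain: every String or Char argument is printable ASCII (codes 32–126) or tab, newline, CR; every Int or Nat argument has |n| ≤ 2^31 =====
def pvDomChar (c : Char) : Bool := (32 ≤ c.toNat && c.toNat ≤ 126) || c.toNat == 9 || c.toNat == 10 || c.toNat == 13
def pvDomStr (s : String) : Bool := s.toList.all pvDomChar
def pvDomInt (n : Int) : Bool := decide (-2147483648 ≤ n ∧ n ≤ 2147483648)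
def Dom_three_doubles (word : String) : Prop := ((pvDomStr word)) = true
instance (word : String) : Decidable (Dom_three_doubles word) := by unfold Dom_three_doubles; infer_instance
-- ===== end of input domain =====

-- B scans 6-character windows directly for the double/gap/double/gap/double pattern
-- instead of building a '*'/' ' marker string and substring-searching it (objective: simpler).


-- ===== PORT A =====
-- s = ""; for i in range(1, len(word)): s += "*" if word[i-1] == word[i] else " "; return "* * *" in s
def three_doubles (word : String) : Bool :=
  PySem.Chars.isIn ['*', ' ', '*', ' ', '*']
    ((PySem.List.pyRange 1 (word.toList.length : Int) 1).foldl
      (fun s i =>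
        if PySem.List.pyGet? word.toList (i - 1) == PySem.List.pyGet? word.toList i
        then s ++ ['*'] else s ++ [' '])
      [])

-- ===== PORT B =====
-- for p in range(len(word) - 5): if the five window comparisons hold: return True; return False
def three_doubles_alt (word : String) : Bool :=
  (PySem.List.pyRange 0 ((word.toList.length : Int) - 5) 1).any fun p =>
    (PySem.List.pyGet? word.toList p == PySem.List.pyGet? word.toList (p + 1)) &&
    !(PySem.List.pyGet? word.toList (p + 1) == PySem.List.pyGet? word.toList (p + 2)) &&
    (PySem.List.pyGet? word.toList (p + 2) == PySem.List.pyGet? word.toList (p + 3)) &&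
    !(PySem.List.pyGet? word.toList (p + 3) == PySem.List.pyGet? word.toList (p + 4)) &&
    (PySem.List.pyGet? word.toList (p + 4) == PySem.List.pyGet? word.toList (p + 5))

-- ===== PRECONDITION & SPEC =====
def Spec_three_doubles (word : String) (out : Bool) : Prop := out = three_doubles_alt word
instance (word : String) (out : Bool) : Decidable (Spec_three_doubles word out) := by unfold Spec_three_doubles; infer_instance

-- ===== CLAIM (what is proved, stated in full; the proofs are below) =====
def Claim_equal_three_doubles : Prop := ∀ (word : String), Dom_three_doubles word → Spec_three_doubles word (three_doubles word)

-- ===== LEMMAS AND PROOFS =====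

-- the marker character A writes at position j of its string s
def pvMark (cs : List Char) (j : Nat) : Char :=
  if PySem.List.pyGet? cs (j : Int) == PySem.List.pyGet? cs ((j : Int) + 1) then '*' else ' '

lemma pvRange_one (n : Nat) :
    PySem.List.pyRange 1 (n : Int) 1 = (List.range (n - 1)).map (fun (j : Nat) => (j : Int) + 1) := by
  induction n with
  | zero =>
    have h : PySem.List.pyRange 1 ((0 : Nat) : Int) 1 = [] := by decide
    rw [h]; rfl
  | succ m ih =>
    rcases Nat.eq_zero_or_pos m with hm | hm
    · subst hm; decide
    · have h1 : (1 : Int) ≤ (m : Int) := by exact_mod_cast hm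
      rw [show ((m + 1 : Nat) : Int) = (m : Int) + 1 by push_cast; ring,
        PySem.List.pyRange_one_succ_right h1, ih]
      rw [show m + 1 - 1 = (m - 1) + 1 by omega, List.range_succ, List.map_append]
      simp only [List.map_cons, List.map_nil]
      congr 2
      omega

lemma pvFold (cs : List Char) (l : List Int) (acc : List Char) :
    l.foldl
      (fun s i =>
        if PySem.List.pyGet? cs (i - 1) == PySem.List.pyGet? cs i then s ++ ['*'] else s ++ [' '])
      acc =
    acc ++ l.map (fun i => if PySem.List.pyGet? cs (i - 1) == PySem.List.pyGet? cs i then '*' else ' ') := by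
  induction l generalizing acc with
  | nil => simp
  | cons x xs ih =>
    simp only [List.foldl_cons, List.map_cons]
    split_ifs with h <;> rw [ih] <;> simp

lemma pvMarker_eq (cs : List Char) :
    (PySem.List.pyRange 1 (cs.length : Int) 1).foldl
      (fun s i =>
        if PySem.List.pyGet? cs (i - 1) == PySem.List.pyGet? cs i then s ++ ['*'] else s ++ [' '])
      [] = (List.range (cs.length - 1)).map (pvMark cs) := by
  rw [pvFold, pvRange_one, List.map_map, List.nil_append]
  apply List.map_congr_left
  intro j _
  simp only [Function.comp_apply, pvMark, show (j : Int) + 1 - 1 = (j : Int) by ring]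

lemma pvMark_star (cs : List Char) (j : Nat) :
    pvMark cs j = '*' ↔
      (PySem.List.pyGet? cs (j : Int) == PySem.List.pyGet? cs ((j : Int) + 1)) = true := by
  unfold pvMark
  split_ifs with h
  · exact iff_of_true rfl h
  · exact iff_of_false (by decide) h

lemma pvMark_space (cs : List Char) (j : Nat) :
    pvMark cs j = ' ' ↔
      (PySem.List.pyGet? cs (j : Int) == PySem.List.pyGet? cs ((j : Int) + 1)) = false := by
  unfold pvMark
  split_ifs with h
  · exact iff_of_false (by decide) (by rw [h]; decide)
  · exact iff_of_true rfl (Bool.eq_false_iff.mpr h)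

-- A's "'* * *' in s" finds the pattern at marker position j iff the five window tests hold
lemma pvPrefix_iff (cs : List Char) (j : Nat) :
    (['*', ' ', '*', ' ', '*'] <+: ((List.range (cs.length - 1)).map (pvMark cs)).drop j) ↔
      (j + 5 ≤ cs.length - 1 ∧
        pvMark cs j = '*' ∧ pvMark cs (j + 1) = ' ' ∧ pvMark cs (j + 2) = '*' ∧
        pvMark cs (j + 3) = ' ' ∧ pvMark cs (j + 4) = '*') := by
  have hdrop : ∀ _ : j + 5 ≤ cs.length - 1,
      (((List.range (cs.length - 1)).map (pvMark cs)).drop j).take 5 =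
        [pvMark cs j, pvMark cs (j+1), pvMark cs (j+2), pvMark cs (j+3), pvMark cs (j+4)] := by
    intro hle
    rw [← List.map_drop, ← List.map_take]
    rw [show (List.range (cs.length - 1)).drop j = List.range' j (cs.length - 1 - j) by
      simp [List.range_eq_range', List.drop_range']]
    rw [List.take_range'_of_length_ge (by omega)]
    simp [List.range']
  rw [List.prefix_iff_eq_take]
  constructor
  · intro h
    have hlen := congrArg List.length h
    simp only [List.length_cons, List.length_nil, List.length_take, List.length_drop,
      List.length_map, List.length_range] at hlen
    have hle : j + 5 ≤ cs.length - 1 := by omega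
    rw [show (5 : Nat) = (['*', ' ', '*', ' ', '*'] : List Char).length from rfl] at hdrop
    rw [hdrop hle] at h
    obtain ⟨e0, e1, e2, e3, e4⟩ : '*' = pvMark cs j ∧ ' ' = pvMark cs (j+1) ∧
        '*' = pvMark cs (j+2) ∧ ' ' = pvMark cs (j+3) ∧ '*' = pvMark cs (j+4) := by
      simpa using h
    exact ⟨hle, e0.symm, e1.symm, e2.symm, e3.symm, e4.symm⟩
  · rintro ⟨hle, h0, h1, h2, h3, h4⟩
    rw [show (['*', ' ', '*', ' ', '*'] : List Char).length = 5 from rfl, hdrop hle,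
      h0, h1, h2, h3, h4]

-- B's window test at p = ↑j, restated through pvMark
lemma pvCond_iff (cs : List Char) (j : Nat) :
    ((PySem.List.pyGet? cs (j : Int) == PySem.List.pyGet? cs ((j : Int) + 1)) &&
     !(PySem.List.pyGet? cs ((j : Int) + 1) == PySem.List.pyGet? cs ((j : Int) + 2)) &&
     (PySem.List.pyGet? cs ((j : Int) + 2) == PySem.List.pyGet? cs ((j : Int) + 3)) &&
     !(PySem.List.pyGet? cs ((j : Int) + 3) == PySem.List.pyGet? cs ((j : Int) + 4)) &&
     (PySem.List.pyGet? cs ((j : Int) + 4) == PySem.List.pyGet? cs ((j : Int) + 5))) = true ↔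
      (pvMark cs j = '*' ∧ pvMark cs (j + 1) = ' ' ∧ pvMark cs (j + 2) = '*' ∧
        pvMark cs (j + 3) = ' ' ∧ pvMark cs (j + 4) = '*') := by
  rw [pvMark_star, pvMark_space, pvMark_star, pvMark_space, pvMark_star]
  rw [show ((j + 1 : Nat) : Int) = (j : Int) + 1 by push_cast; ring,
    show ((j + 2 : Nat) : Int) = (j : Int) + 2 by push_cast; ring,
    show ((j + 3 : Nat) : Int) = (j : Int) + 3 by push_cast; ring,
    show ((j + 4 : Nat) : Int) = (j : Int) + 4 by push_cast; ring,
    show ((j : Int) + 1 + 1) = (j : Int) + 2 by ring,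
    show ((j : Int) + 2 + 1) = (j : Int) + 3 by ring,
    show ((j : Int) + 3 + 1) = (j : Int) + 4 by ring,
    show ((j : Int) + 4 + 1) = (j : Int) + 5 by ring]
  simp [Bool.and_eq_true, and_assoc]

lemma pvMain (word : String) : three_doubles word = three_doubles_alt word := by
  unfold three_doubles three_doubles_alt
  rw [Bool.eq_iff_iff, pvMarker_eq, ← PySem.Chars.exists_prefix_drop_iff_isIn, List.any_eq_true]
  constructor
  · rintro ⟨j, hj⟩
    rw [pvPrefix_iff] at hj
    obtain ⟨hle, h0, h1, h2, h3, h4⟩ := hj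
    refine ⟨(j : Int), ?_, ?_⟩
    · rw [PySem.List.mem_pyRange_one]
      constructor <;> omega
    · rw [pvCond_iff]
      exact ⟨h0, h1, h2, h3, h4⟩
  · rintro ⟨i, hm, hc⟩
    rw [PySem.List.mem_pyRange_one] at hm
    obtain ⟨h0i, hi⟩ := hm
    have hji : ((i.toNat : Nat) : Int) = i := Int.toNat_of_nonneg h0i
    refine ⟨i.toNat, ?_⟩
    rw [pvPrefix_iff]
    rw [← hji] at hc
    rw [pvCond_iff] at hc
    exact ⟨by omega, hc⟩

-- ===== VERDICT (by name: the statement is the Claim_ definition above) =====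
theorem three_doubles_spec : Claim_equal_three_doubles := by
  intro word _
  unfold Spec_three_doubles
  exact pvMain word
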